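-- pv_equiv track=rewrite | github.com/artemsaledev/meeting-digest-bot | meeting_digest_bot/task_drafts.py | _markdown_tables_to_lines
-- ===== SOURCE A (Python) =====
-- def _markdown_tables_to_lines(text: str) -> str:
--     lines = text.splitlines()
--     result: list[str] = []
--     index = 0
--     while index < len(lines):
--         line = lines[index]
--         if _looks_like_markdown_table_row(line) and index + 1 < len(lines) and _is_markdown_table_separator(lines[index + 1]):
--             headers = _split_markdown_table_row(line)
--             index += 2
--             while index < len(lines) and _looks_like_markdown_table_row(lines[index]):
--                 values = _split_markdown_table_row(lines[index])
--                 pairs = []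
--                 for header, value in zip(headers, values):
--                     if header and value:
--                         pairs.append(f"{header}: {value}")
--                 if pairs:
--                     result.append("; ".join(pairs))
--                 index += 1
--             continue
--         result.append(line)
--         index += 1
--     return "\n".join(result)
--
-- def _looks_like_markdown_table_row(line: str) -> bool:
--     stripped = line.strip()
--     return stripped.startswith("|") and stripped.endswith("|") and stripped.count("|") >= 2
--
-- def _is_markdown_table_separator(line: str) -> bool:
--     stripped = line.strip().strip("|").strip()
--     if not stripped:
--         return False
--     return all(char in "-:| " for char in stripped) and "-" in stripped
--
-- def _split_markdown_table_row(line: str) -> list[str]: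
--     return [cell.strip() for cell in line.strip().strip("|").split("|")]
-- ===== SOURCE B (Python) =====
-- def _looks_like_markdown_table_row(line: str) -> bool:
--     stripped = line.strip()
--     return stripped.startswith("|") and stripped.endswith("|") and stripped.count("|") >= 2
--
-- def _is_markdown_table_separator(line: str) -> bool:
--     stripped = line.strip().strip("|").strip()
--     if not stripped:
--         return False
--     return all(char in "-:| " for char in stripped) and "-" in stripped
--
-- def _split_markdown_table_row(line: str) -> list[str]:
--     return [cell.strip() for cell in line.strip().strip("|").split("|")]
--
-- def _markdown_tables_to_lines(text: str) -> str:
--     lines = text.splitlines()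
--     out: list[str] = []
--     headers = None          # not None => inside a table body
--     skip = False            # the separator line just after a header
--     for i, line in enumerate(lines):
--         if skip:
--             skip = False
--             continue
--         if headers is not None:
--             if _looks_like_markdown_table_row(line):
--                 pairs = [f"{h}: {v}" for h, v in zip(headers, _split_markdown_table_row(line)) if h and v]
--                 if pairs:
--                     out.append("; ".join(pairs))
--                 continue
--             headers = None   # table ended: fall through and re-handle this line
--         if _looks_like_markdown_table_row(line) and i + 1 < len(lines) and _is_markdown_table_separator(lines[i + 1]):
--             headers = _split_markdown_table_row(line)
--             skip = True
--         else:
--             out.append(line)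
--     return "\n".join(out)
-- ===== Notes on version B (the rewrite author's own statement) =====
-- stated objective: alternative
-- what changed: Replaced A's index-driven outer while loop with a nested inner row-consuming loop by a single flat pass over the lines that carries explicit state (current table headers and a separator-skip flag), with the table-ending line re-handled by falling through to the non-table case.
import Mathlib
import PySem

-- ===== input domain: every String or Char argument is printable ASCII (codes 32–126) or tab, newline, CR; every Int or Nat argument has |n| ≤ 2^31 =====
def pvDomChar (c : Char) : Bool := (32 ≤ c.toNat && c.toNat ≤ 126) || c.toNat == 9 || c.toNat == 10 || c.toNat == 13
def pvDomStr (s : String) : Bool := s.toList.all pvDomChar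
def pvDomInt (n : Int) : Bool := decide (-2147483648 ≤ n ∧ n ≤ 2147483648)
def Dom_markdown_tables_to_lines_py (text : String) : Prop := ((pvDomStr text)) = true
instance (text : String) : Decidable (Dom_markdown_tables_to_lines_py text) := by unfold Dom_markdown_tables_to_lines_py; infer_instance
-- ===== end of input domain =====

-- B replaces A's index-driven outer/inner while loops by one flat pass over the
-- lines that carries table state (current headers + a separator-skip flag);
-- objective: alternative decomposition, same asymptotic cost.

-- ===== PORT A =====
-- shared helper ports (the Python helpers are identical in A and B)
def pvLooks (line : String) : Bool :=
  let stripped := PySem.Str.strip line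
  PySem.Str.startswith stripped "|" && PySem.Str.endswith stripped "|"
    && decide (2 ≤ PySem.Str.count stripped "|")

def pvSep (line : String) : Bool :=
  let stripped := PySem.Str.strip (PySem.Str.stripChars (PySem.Str.strip line) "|")
  if stripped = "" then false
  else stripped.toList.all (fun c => c ∈ "-:| ".toList) && PySem.Str.isIn "-" stripped

def pvSplit (line : String) : List String :=
  ((PySem.Str.split? (PySem.Str.stripChars (PySem.Str.strip line) "|") "|").getD []).map PySem.Str.strip

-- A's inner while loop: consume table rows, returning (converted rows, remaining lines)
def pvRowsA (headers : List String) : List String → List String × List String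
  | [] => ([], [])
  | l :: rest =>
    if pvLooks l then
      let values := pvSplit l
      let pairs := (headers.zip values).foldl
        (fun acc hv => if (hv.1 != "") && (hv.2 != "") then acc ++ [hv.1 ++ ": " ++ hv.2] else acc) []
      let r := pvRowsA headers rest
      ((if pairs ≠ [] then [PySem.Str.join "; " pairs] else []) ++ r.1, r.2)
    else ([], l :: rest)

theorem pvRowsA_snd_le (headers : List String) (ls : List String) :
    (pvRowsA headers ls).2.length ≤ ls.length := by
  induction ls with
  | nil => simp [pvRowsA]
  | cons l rest ih =>
    simp only [pvRowsA]
    split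
    · simpa using Nat.le_succ_of_le ih
    · simp

-- A's outer while loop, index advance modelled by consuming the list front
def pvOuterA : List String → List String
  | [] => []
  | line :: rest =>
    if pvLooks line && (match rest with | nxt :: _ => pvSep nxt | [] => false) then
      let headers := pvSplit line
      let r := pvRowsA headers rest.tail
      r.1 ++ pvOuterA r.2
    else line :: pvOuterA rest
termination_by ls => ls.length
decreasing_by
  · have := pvRowsA_snd_le (pvSplit line) rest.tail
    have h2 : rest.tail.length ≤ rest.length := by cases rest <;> simp
    simp only [List.length_cons]; omega
  · simp

def markdown_tables_to_lines_py (text : String) : String :=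
  PySem.Str.join "\n" (pvOuterA (PySem.Str.splitlines text))

-- ===== PORT B =====
-- one flat pass; state = optional current headers + separator-skip flag;
-- the fall-through re-handling of a table-ending line is the 'none' recursive call
def pvLoopB (hdrs : Option (List String)) (skip : Bool) (ls : List String) : List String :=
  match ls with
  | [] => []
  | line :: rest =>
    if skip then pvLoopB hdrs false rest
    else
      match hdrs with
      | some h =>
        if pvLooks line then
          let pairs := ((h.zip (pvSplit line)).filter
              (fun hv => (hv.1 != "") && (hv.2 != ""))).map (fun hv => hv.1 ++ ": " ++ hv.2)
          (if pairs ≠ [] then [PySem.Str.join "; " pairs] else []) ++ pvLoopB (some h) false rest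
        else pvLoopB none false (line :: rest)
      | none =>
        if pvLooks line && (match rest with | nxt :: _ => pvSep nxt | [] => false) then
          pvLoopB (some (pvSplit line)) true rest
        else line :: pvLoopB none false rest
termination_by 2 * ls.length + (if hdrs.isSome then 1 else 0)
decreasing_by all_goals simp_all <;> omega

def markdown_tables_to_lines_py_alt (text : String) : String :=
  PySem.Str.join "\n" (pvLoopB none false (PySem.Str.splitlines text))

-- ===== PRECONDITION & SPEC =====
def Spec_markdown_tables_to_lines_py (text : String) (out : String) : Prop := out = markdown_tables_to_lines_py_alt text
instance (text : String) (out : String) : Decidable (Spec_markdown_tables_to_lines_py text out) := by unfold Spec_markdown_tables_to_lines_py; infer_instance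

-- ===== CLAIM (what is proved, stated in full; the proofs are below) =====
def Claim_equal_markdown_tables_to_lines_py : Prop := ∀ (text : String), Dom_markdown_tables_to_lines_py text → Spec_markdown_tables_to_lines_py text (markdown_tables_to_lines_py text)

-- ===== LEMMAS AND PROOFS =====

-- B in table mode computes exactly A's inner loop followed by the fall-through
theorem pvLoopB_some (h : List String) (ls : List String) :
    pvLoopB (some h) false ls = (pvRowsA h ls).1 ++ pvLoopB none false (pvRowsA h ls).2 := by
  induction ls with
  | nil => simp [pvLoopB, pvRowsA]
  | cons l rest ih =>
    rw [pvLoopB, pvRowsA]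
    by_cases hl : pvLooks l
    · simp only [hl, if_pos]
      rw [ih, PySem.List.foldl_append_if]
      simp [List.append_assoc]
    · simp [hl]

theorem pvLoopB_eq_pvOuterA (ls : List String) : pvLoopB none false ls = pvOuterA ls := by
  induction ls using pvOuterA.induct with
  | case1 => simp [pvLoopB, pvOuterA]
  | case2 line rest hcond headers r ih =>
    rw [pvLoopB.eq_def, pvOuterA.eq_def]
    simp only [if_pos hcond, if_false, Bool.false_eq_true]
    obtain ⟨nxt, rest', rfl⟩ : ∃ nxt rest', rest = nxt :: rest' := by
      cases rest with
      | nil => simp at hcond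
      | cons a b => exact ⟨a, b, rfl⟩
    rw [pvLoopB.eq_def]
    simp only [if_pos True.intro]
    rw [pvLoopB_some]
    simp only [headers, r, List.tail_cons] at ih
    rw [ih]
    simp
  | case3 line rest hcond ih =>
    rw [pvLoopB.eq_def, pvOuterA.eq_def]
    simp only [if_neg hcond, if_false, Bool.false_eq_true]
    rw [ih]

-- ===== VERDICT (by name: the statement is the Claim_ definition above) =====
theorem markdown_tables_to_lines_py_spec : Claim_equal_markdown_tables_to_lines_py := by
  intro text _
  unfold Spec_markdown_tables_to_lines_py markdown_tables_to_lines_py markdown_tables_to_lines_py_alt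
  rw [pvLoopB_eq_pvOuterA]
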